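-- pv_equiv track=rewrite | github.com/prodProject/WorkkerAndConsumerServer | CommonCode/strings.py | getTittleCaseStringMaker
-- ===== SOURCE A (Python) =====
-- def getTittleCaseStringMaker(data):
--     Char1 = '^'
--     Char2 = '^^'
--     resultString = ''
--     counter = 1
--     for x in data.split(' '):
--         if (counter == 1):
--             resultString = resultString + Char2 + x.lower()
--         else:
--             resultString = resultString + Char1 + x.lower()
--         counter = counter+1
--     return resultString
-- ===== SOURCE B (Python) =====
-- def getTittleCaseStringMaker(data):
--     return '^^' + data.lower().replace(' ', '^')
-- ===== Notes on version B (the rewrite author's own statement) =====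
-- stated objective: simpler
-- what changed: Drops the split-into-words loop with its first-word counter branch entirely: B lowercases the whole string once and replaces each space by '^' (join of split(' ') with '^' is exactly space-replacement), prefixing '^^'.
import Mathlib
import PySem

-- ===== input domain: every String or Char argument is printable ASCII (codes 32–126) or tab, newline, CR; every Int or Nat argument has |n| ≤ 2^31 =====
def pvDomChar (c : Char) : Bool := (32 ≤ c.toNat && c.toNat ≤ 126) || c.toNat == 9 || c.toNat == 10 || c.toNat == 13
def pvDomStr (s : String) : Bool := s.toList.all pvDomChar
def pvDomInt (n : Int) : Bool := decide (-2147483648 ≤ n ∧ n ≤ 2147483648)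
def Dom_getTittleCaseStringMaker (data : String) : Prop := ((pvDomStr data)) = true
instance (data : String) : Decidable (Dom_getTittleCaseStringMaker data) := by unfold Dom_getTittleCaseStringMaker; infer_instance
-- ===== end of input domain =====

-- B drops A's word loop entirely: lowercase once and replace each space with '^', prefix '^^' (simpler; avoids A's quadratic concatenation loop).


-- ===== PORT A =====
-- counter/if-else loop over data.split(' '), accumulating resultString (done on List Char, exact for split/lower)
def getTittleCaseStringMaker (data : String) : String :=
  let char1 : List Char := "^".toList
  let char2 : List Char := "^^".toList
  let st := (PySem.Chars.splitOn data.toList " ".toList).foldl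
    (fun (st : List Char × Int) x =>
      if st.2 == 1 then (st.1 ++ char2 ++ PySem.Chars.lower x, st.2 + 1)
      else (st.1 ++ char1 ++ PySem.Chars.lower x, st.2 + 1)) ([], 1)
  String.mk st.1

-- ===== PORT B =====
-- '^^' + data.lower().replace(' ', '^'), as in Source B: no word list, one lower pass and one replace pass
def getTittleCaseStringMaker_alt (data : String) : String :=
  String.mk ("^^".toList ++
    PySem.Chars.replace (PySem.Chars.lower data.toList) " ".toList "^".toList)

-- ===== PRECONDITION & SPEC =====
def Spec_getTittleCaseStringMaker (data : String) (out : String) : Prop := out = getTittleCaseStringMaker_alt data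
instance (data : String) (out : String) : Decidable (Spec_getTittleCaseStringMaker data out) := by unfold Spec_getTittleCaseStringMaker; infer_instance

-- ===== CLAIM (what is proved, stated in full; the proofs are below) =====
def Claim_equal_getTittleCaseStringMaker : Prop := ∀ (data : String), Dom_getTittleCaseStringMaker data → Spec_getTittleCaseStringMaker data (getTittleCaseStringMaker data)

-- ===== LEMMAS AND PROOFS =====

-- the common character transform both sides compute: space ↦ '^', other ↦ lowercase
def pvTr (c : Char) : Char := if c = ' ' then '^' else PySem.Chars.lowerChar c

-- lowering an upper-case letter never yields a space
theorem lowerChar_ne_space (c : Char) (h : PySem.Chars.isupper c = true) :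
    PySem.Chars.lowerChar c ≠ ' ' := by
  simp only [PySem.Chars.lowerChar, h, if_true]
  simp only [PySem.Chars.isupper, Bool.and_eq_true, decide_eq_true_eq, Char.le_def] at h
  have h1 : 65 ≤ c.toNat := (UInt32.le_iff_toNat_le ..).mp h.1
  have h2 : c.toNat ≤ 90 := (UInt32.le_iff_toNat_le ..).mp h.2
  intro hc
  have := congrArg Char.toNat hc
  rw [Char.toNat_ofNat] at this
  have hsp : (' ').toNat = 32 := rfl
  rw [hsp] at this
  split_ifs at this <;> omega

-- c is a space iff its lowercase is
theorem tr_lower (c : Char) :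
    (if PySem.Chars.lowerChar c = ' ' then '^' else PySem.Chars.lowerChar c) = pvTr c := by
  unfold pvTr
  by_cases hu : PySem.Chars.isupper c = true
  · rw [if_neg (lowerChar_ne_space c hu), if_neg]
    intro h; subst h; exact absurd hu (by decide)
  · have : PySem.Chars.lowerChar c = c := by simp [PySem.Chars.lowerChar, hu]
    rw [this]

-- B's replace on a single-char pattern is the pointwise map
theorem replace_go_space (fuel : Nat) (l acc : List Char) (h : l.length ≤ fuel) :
    PySem.Chars.replace.go " ".toList "^".toList fuel l acc
    = acc.reverse ++ l.map (fun c => if c = ' ' then '^' else c) := by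
  induction fuel generalizing l acc with
  | zero =>
    unfold PySem.Chars.replace.go
    cases l with
    | nil => simp
    | cons c t => simp at h
  | succ n ih =>
    unfold PySem.Chars.replace.go
    cases l with
    | nil => simp
    | cons c t =>
      by_cases hc : c = ' '
      · subst hc
        have hpre : (" ".toList).isPrefixOf (' ' :: t) = true := by simp [List.isPrefixOf]
        simp only [hpre, if_true]
        rw [ih _ _ (by simpa using Nat.le_of_succ_le_succ (by simpa using h))]
        simp
      · have hpre : (" ".toList).isPrefixOf (c :: t) = false := by
          simp [List.isPrefixOf]; exact fun h' => hc h'.symm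
        simp only [hpre]
        rw [if_neg (by simp [hpre])]
        rw [ih _ _ (by simpa using Nat.le_of_succ_le_succ (by simpa using h))]
        simp [hc]

-- the split accumulator factors out
theorem splitOn_go_acc (sep : List Char) (fuel : Nat) (l cur : List Char) (acc : List (List Char)) :
    PySem.Chars.splitOn.go sep fuel l cur acc
    = acc.reverse ++ PySem.Chars.splitOn.go sep fuel l cur [] := by
  induction fuel generalizing l cur acc with
  | zero => unfold PySem.Chars.splitOn.go; simp
  | succ n ih =>
    unfold PySem.Chars.splitOn.go
    cases l with
    | nil => simp
    | cons c rest =>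
      by_cases hp : sep.isPrefixOf (c :: rest) = true
      · simp only [hp, if_true]
        rw [ih _ _ (cur.reverse :: acc), ih _ _ [cur.reverse]]
        simp
      · simp only [hp]
        rw [if_neg (by simp [hp]), if_neg (by simp [hp]), ih]

-- split(' ') never returns an empty list
theorem splitOn_go_ne_nil (sep : List Char) (fuel : Nat) (l cur : List Char)
    (acc : List (List Char)) : PySem.Chars.splitOn.go sep fuel l cur acc ≠ [] := by
  induction fuel generalizing l cur acc with
  | zero => unfold PySem.Chars.splitOn.go; simp
  | succ n ih =>
    unfold PySem.Chars.splitOn.go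
    cases l with
    | nil => simp
    | cons c rest =>
      by_cases h : sep.isPrefixOf (c :: rest) = true
      · simpa [h] using ih _ _ _
      · simpa [h] using ih _ _ _

-- 'first word plain, the rest '^'-prefixed', the shape A's loop produces
def pvF (ws : List (List Char)) : List Char :=
  PySem.Chars.lower ws.headI ++ ws.tail.flatMap (fun x => '^' :: PySem.Chars.lower x)

-- the word-wise view of split(' ') collapses to the character-wise transform
theorem splitOn_go_F (fuel : Nat) (l cur : List Char) (h : l.length ≤ fuel) :
    pvF (PySem.Chars.splitOn.go " ".toList fuel l cur [])
    = PySem.Chars.lower cur.reverse ++ l.map pvTr := by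
  induction fuel generalizing l cur with
  | zero =>
    unfold PySem.Chars.splitOn.go
    cases l with
    | nil => simp [pvF]
    | cons c t => simp at h
  | succ n ih =>
    unfold PySem.Chars.splitOn.go
    cases l with
    | nil => simp [pvF]
    | cons c rest =>
      by_cases hc : c = ' '
      · subst hc
        have hpre : (" ".toList).isPrefixOf (' ' :: rest) = true := by simp [List.isPrefixOf]
        simp only [hpre, if_true]
        rw [splitOn_go_acc]
        have hdrop : List.drop (" ".toList).length (' ' :: rest) = rest := rfl
        rw [hdrop]
        obtain ⟨w, rs, hw⟩ : ∃ w rs, PySem.Chars.splitOn.go " ".toList n rest [] [] = w :: rs := by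
          cases hgo : PySem.Chars.splitOn.go " ".toList n rest [] [] with
          | nil => exact absurd hgo (splitOn_go_ne_nil _ _ _ _ _)
          | cons w rs => exact ⟨w, rs, rfl⟩
        have hrest := ih rest [] (by simpa using Nat.le_of_succ_le_succ (by simpa using h))
        rw [hw] at hrest ⊢
        simp only [pvF, List.headI, List.tail] at hrest ⊢
        simp only [List.reverse_cons, List.reverse_nil, List.nil_append, List.singleton_append,
          List.flatMap_cons]
        simp only [PySem.Chars.lower, List.reverse_nil, List.map_nil, List.nil_append] at hrest
        simp only [List.map_cons, PySem.Chars.lower]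
        rw [← hrest]
        simp [pvTr]
      · have hpre : (" ".toList).isPrefixOf (c :: rest) = false := by
          simp [List.isPrefixOf]; exact fun h' => hc h'.symm
        simp only [hpre]
        rw [if_neg (by simp [hpre])]
        rw [ih rest (c :: cur) (by simpa using Nat.le_of_succ_le_succ (by simpa using h))]
        simp [PySem.Chars.lower, pvTr, hc]

-- the tail of A's loop (counter ≥ 2): each word appends the single marker and its lowercase
theorem foldA_tail (ws : List (List Char)) (s : List Char) (c : Int) (hc : 2 ≤ c) :
    (ws.foldl (fun (st : List Char × Int) x =>
      if st.2 == 1 then (st.1 ++ "^^".toList ++ PySem.Chars.lower x, st.2 + 1)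
      else (st.1 ++ "^".toList ++ PySem.Chars.lower x, st.2 + 1)) (s, c)).1
    = s ++ ws.flatMap (fun x => '^' :: PySem.Chars.lower x) := by
  induction ws generalizing s c with
  | nil => simp
  | cons w rest ih =>
    have h1 : (c == 1) = false := by simp; omega
    simp only [List.foldl_cons, h1, Bool.false_eq_true, if_false, List.flatMap_cons]
    rw [ih _ _ (by omega)]
    simp

-- ===== VERDICT (by name: the statement is the Claim_ definition above) =====
theorem getTittleCaseStringMaker_spec : Claim_equal_getTittleCaseStringMaker := by
  intro data _
  unfold Spec_getTittleCaseStringMaker getTittleCaseStringMaker getTittleCaseStringMaker_alt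
  -- A's side: first word with '^^', then the tail loop, then collapse to the char map
  obtain ⟨w, rest, hws⟩ : ∃ w rest, PySem.Chars.splitOn data.toList " ".toList = w :: rest := by
    cases hsp : PySem.Chars.splitOn data.toList " ".toList with
    | nil => exact absurd hsp (splitOn_go_ne_nil _ _ _ _ _)
    | cons w rest => exact ⟨w, rest, rfl⟩
  have hF : pvF (PySem.Chars.splitOn data.toList " ".toList) = data.toList.map pvTr := by
    unfold PySem.Chars.splitOn
    rw [splitOn_go_F _ _ _ (by omega)]
    simp [PySem.Chars.lower]
  rw [hws] at hF
  simp only [hws, List.foldl_cons]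
  rw [show ((1 : Int) == 1) = true from rfl]
  simp only [if_true]
  rw [show ((1 : Int) + 1) = 2 from rfl,
      show ([] ++ "^^".toList ++ PySem.Chars.lower w : List Char)
        = "^^".toList ++ PySem.Chars.lower w from by simp]
  rw [foldA_tail rest _ 2 (by omega)]
  -- B's side: replace is the pointwise map, and lowering commutes with the space test
  unfold PySem.Chars.replace
  rw [if_neg (by simp)]
  rw [replace_go_space _ _ _ (le_refl _)]
  simp only [List.reverse_nil, List.nil_append, PySem.Chars.lower, List.map_map]
  have hmap : data.toList.map ((fun c => if c = ' ' then '^' else c) ∘ PySem.Chars.lowerChar)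
      = data.toList.map pvTr := by
    apply List.map_congr_left; intro c _; exact tr_lower c
  rw [hmap, ← hF]
  simp only [pvF, List.headI, List.tail]
  simp [PySem.Chars.lower]
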